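-- pv_equiv track=rewrite | github.com/wittmaan/AdventOfCode2018 | src/main/python/day20.py | parse
-- ===== SOURCE A (Python) =====
-- from collections import defaultdict
--
-- DIRECTION = {'E': (0, 1), 'W': (0, -1), 'N': (-1, 0), 'S': (1, 0)}
--
-- def parse(x):
--     pos = (0, 0)
--     result = defaultdict(list)
--     stack = []
--
--     for i, c in enumerate(x[1:-1]):
--         if c in "ENSW":
--             oldpos = pos
--             dx, dy = DIRECTION[c]
--             x, y = pos
--             pos = (x + dx, y + dy)
--             result[oldpos].append(pos)
--         elif c == '(':
--             stack.append(pos)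
--         elif c == ')':
--             pos = stack.pop()
--         elif c == '|':
--             pos = stack[-1]
--     return result
-- ===== SOURCE B (Python) =====
-- from collections import defaultdict
--
-- DIRECTION = {'E': (0, 1), 'W': (0, -1), 'N': (-1, 0), 'S': (1, 0)}
--
-- def parse(x):
--     inner = x[1:-1]
--     result = defaultdict(list)
--
--     def seq(i, pos):
--         # consume moves/groups until a ')' or '|' (returned as terminator) or end of input
--         while i < len(inner):
--             c = inner[i]
--             if c in "ENSW":
--                 dx, dy = DIRECTION[c]
--                 new = (pos[0] + dx, pos[1] + dy)
--                 result[pos].append(new)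
--                 pos = new
--                 i += 1
--             elif c == '(':
--                 i = group(i + 1, pos)
--             elif c in ")|":
--                 return i + 1, c
--             else:
--                 i += 1
--         return i, None
--
--     def group(i, start):
--         # parse '|'-separated branches, each restarting from the group-start position
--         while True:
--             i, t = seq(i, start)
--             if t != '|':
--                 return i
--
--     seq(0, (0, 0))
--     return result
-- ===== Notes on version B (the rewrite author's own statement) =====
-- stated objective: alternative
-- what changed: Replaced A's flat character loop with an explicit position stack by a recursive-descent parser: a sequence routine consumes moves and nested groups via a cursor and an alternation routine restarts each branch from the group-start position, so the stack disappears into the call structure.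
import Mathlib
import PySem

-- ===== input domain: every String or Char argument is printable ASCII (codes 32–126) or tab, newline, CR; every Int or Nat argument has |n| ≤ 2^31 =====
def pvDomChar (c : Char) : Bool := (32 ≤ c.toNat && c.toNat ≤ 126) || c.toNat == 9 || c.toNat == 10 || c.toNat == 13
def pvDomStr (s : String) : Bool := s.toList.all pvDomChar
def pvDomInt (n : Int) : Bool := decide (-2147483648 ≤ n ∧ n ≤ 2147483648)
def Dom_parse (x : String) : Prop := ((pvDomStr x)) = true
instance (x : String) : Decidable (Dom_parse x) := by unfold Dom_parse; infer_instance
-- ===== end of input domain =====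

-- B replaces A's flat loop with an explicit position stack by a recursive-descent
-- parser (cursor + mutual sequence/alternation routines); same return value.

-- shared context helpers (both Pythons share DIRECTION, the defaultdict append, and x[1:-1])
def pvMove (c : Char) (p : Int × Int) : Int × Int :=
  if c = 'E' then (p.1, p.2 + 1)
  else if c = 'W' then (p.1, p.2 - 1)
  else if c = 'N' then (p.1 - 1, p.2)
  else (p.1 + 1, p.2)

def pvAdd (res : PySem.Dict (Int × Int) (List (Int × Int))) (old new : Int × Int) :
    PySem.Dict (Int × Int) (List (Int × Int)) :=
  res.insert old (res.getD old [] ++ [new])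

def pvInner (x : String) : List Char := PySem.List.slice x.toList (some 1) (some (-1))

def pvOut (res : PySem.Dict (Int × Int) (List (Int × Int))) : List (Int × Int × List (Int × Int)) :=
  res.items.map (fun p => (p.1.1, p.1.2, p.2))

-- ===== PORT A =====
def stepA (st : (Int × Int) × PySem.Dict (Int × Int) (List (Int × Int)) × List (Int × Int))
    (c : Char) : (Int × Int) × PySem.Dict (Int × Int) (List (Int × Int)) × List (Int × Int) :=
  if c = 'E' ∨ c = 'N' ∨ c = 'S' ∨ c = 'W' then
    let p' := pvMove c st.1
    (p', pvAdd st.2.1 st.1 p', st.2.2)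
  else if c = '(' then (st.1, st.2.1, st.1 :: st.2.2)
  else if c = ')' then
    match st.2.2 with
    | top :: rest => (top, st.2.1, rest)
    | [] => st            -- Python raises IndexError (stack.pop on empty); excluded by Pre_parse
  else if c = '|' then
    match st.2.2 with
    | top :: rest => (top, st.2.1, top :: rest)
    | [] => st            -- Python raises IndexError (stack[-1] on empty); excluded by Pre_parse
  else st

def parse (x : String) : List (Int × Int × List (Int × Int)) :=
  pvOut (((pvInner x).foldl stepA ((0, 0), PySem.Dict.empty, [])).2.1)

-- ===== PORT B =====
-- Source B's seq/group mutual recursion; the Nat argument is a totality fuel only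
-- (parse_alt passes enough for every input, proved below), the cursor is the remaining char list.
mutual
def seqB : Nat → List Char → (Int × Int) → PySem.Dict (Int × Int) (List (Int × Int)) →
    List Char × Option Char × PySem.Dict (Int × Int) (List (Int × Int))
  | 0, l, _, res => (l, none, res)
  | _ + 1, [], _, res => ([], none, res)
  | f + 1, c :: rest, pos, res =>
    if c = 'E' ∨ c = 'N' ∨ c = 'S' ∨ c = 'W' then
      let p' := pvMove c pos
      seqB f rest p' (pvAdd res pos p')
    else if c = '(' then
      let g := groupB f rest pos res
      seqB f g.1 pos g.2
    else if c = ')' ∨ c = '|' then (rest, some c, res)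
    else seqB f rest pos res

def groupB : Nat → List Char → (Int × Int) → PySem.Dict (Int × Int) (List (Int × Int)) →
    List Char × PySem.Dict (Int × Int) (List (Int × Int))
  | 0, l, _, res => (l, res)
  | f + 1, l, start, res =>
    match seqB f l start res with
    | (l', some '|', res') => groupB f l' start res'
    | (l', _, res') => (l', res')
end

def parse_alt (x : String) : List (Int × Int × List (Int × Int)) :=
  let l := pvInner x
  pvOut ((seqB (2 * l.length + 2) l (0, 0) PySem.Dict.empty).2.2)

-- ===== PRECONDITION & SPEC =====
-- pvCond l n: every group-close and branch-separator character in l occurs at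
-- parenthesis depth > 0 (relative to n already-open groups).
def pvCond (l : List Char) (n : Nat) : Prop :=
  ∀ i, (h : i < l.length) → (l[i] = ')' ∨ l[i] = '|') →
    (l.take i).count ')' < (l.take i).count '(' + n

-- Pre_parse excludes exactly the inputs whose body x[1:-1] has a group-close or
-- branch-separator character at parenthesis depth 0, on which A raises IndexError
-- (stack.pop() / stack[-1] on an empty stack).
def Pre_parse (x : String) : Prop := pvCond (pvInner x) 0
instance (x : String) : Decidable (Pre_parse x) := by unfold Pre_parse pvCond; infer_instance

def pvWitness_parse : String := "^ENW(E(N|S)|WW)E$"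

def Spec_parse (x : String) (out : List (Int × Int × List (Int × Int))) : Prop := out = parse_alt x
instance (x : String) (out : List (Int × Int × List (Int × Int))) : Decidable (Spec_parse x out) := by
  unfold Spec_parse; infer_instance

-- ===== CLAIM (what is proved, stated in full; the proofs are below) =====
def Claim_equal_parse : Prop := ∀ (x : String), Dom_parse x → Pre_parse x → Spec_parse x (parse x)

-- ===== LEMMAS AND PROOFS =====

theorem pvCond_tail_other {c : Char} {l : List Char} {n : Nat}
    (h1 : c ≠ '(') (h2 : c ≠ ')') (h3 : c ≠ '|') (h : pvCond (c :: l) n) : pvCond l n := by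
  intro i hi hci
  have := h (i + 1) (by simpa using Nat.succ_lt_succ hi) (by simpa using hci)
  simp [List.count_cons, h1, h2, h3] at this ⊢
  omega

theorem pvCond_tail_open {l : List Char} {n : Nat}
    (h : pvCond ('(' :: l) n) : pvCond l (n + 1) := by
  intro i hi hci
  have := h (i + 1) (by simpa using Nat.succ_lt_succ hi) (by simpa using hci)
  simp at this
  omega

theorem pvCond_tail_close {l : List Char} {n : Nat}
    (h : pvCond (')' :: l) (n + 1)) : pvCond l n := by
  intro i hi hci
  have := h (i + 1) (by simpa using Nat.succ_lt_succ hi) (by simpa using hci)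
  simp at this
  omega

theorem pvCond_tail_bar {l : List Char} {n : Nat}
    (h : pvCond ('|' :: l) n) : pvCond l n := by
  intro i hi hci
  have := h (i + 1) (by simpa using Nat.succ_lt_succ hi) (by simpa using hci)
  simpa [List.count_cons] using this

theorem pvCond_head_pos {c : Char} {l : List Char} {n : Nat}
    (hc : c = ')' ∨ c = '|') (h : pvCond (c :: l) n) : 0 < n := by
  have := h 0 (by simp) (by simpa using hc)
  simpa using this

-- The simultaneous invariant relating B's seq/group recursion to A's fold with a stack.
theorem pvMain : ∀ f : Nat,
    (∀ l pos res stack l' t res', 2 * l.length < f → pvCond l stack.length →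
      seqB f l pos res = (l', t, res') →
      ((t = none → l' = [] ∧ (List.foldl stepA (pos, res, stack) l).2.1 = res')
       ∧ (t = some ')' → ∃ top ts, stack = top :: ts ∧ l'.length < l.length ∧
            pvCond l' ts.length ∧
            List.foldl stepA (pos, res, stack) l = List.foldl stepA (top, res', ts) l')
       ∧ (t = some '|' → ∃ top ts, stack = top :: ts ∧ l'.length < l.length ∧
            pvCond l' stack.length ∧
            List.foldl stepA (pos, res, stack) l = List.foldl stepA (top, res', stack) l')
       ∧ (∀ c, t = some c → c = ')' ∨ c = '|')))
    ∧ (∀ l start res stack0 l' res', 2 * l.length + 1 < f → pvCond l (stack0.length + 1) →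
      groupB f l start res = (l', res') →
      ((l' = [] ∧ (List.foldl stepA (start, res, start :: stack0) l).2.1 = res')
       ∨ (l'.length < l.length ∧ pvCond l' stack0.length ∧
          List.foldl stepA (start, res, start :: stack0) l = List.foldl stepA (start, res', stack0) l'))) := by
  intro f
  induction f with
  | zero =>
    exact ⟨fun l _ _ _ _ _ _ hf => absurd hf (by omega),
           fun l _ _ _ _ _ hf => absurd hf (by omega)⟩
  | succ f ih =>
    obtain ⟨ihS, ihG⟩ := ih
    constructor
    · -- seq part
      intro l pos res stack l' t res' hf hc hrun
      cases l with
      | nil =>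
        simp [seqB] at hrun
        obtain ⟨rfl, rfl, rfl⟩ := hrun
        exact ⟨fun _ => ⟨rfl, by simp⟩, fun h => by simp at h, fun h => by simp at h,
               fun c h => by simp at h⟩
      | cons c rest =>
        by_cases hm : c = 'E' ∨ c = 'N' ∨ c = 'S' ∨ c = 'W'
        · -- move character
          have hrun' : seqB f rest (pvMove c pos) (pvAdd res pos (pvMove c pos)) = (l', t, res') := by
            simpa [seqB, hm] using hrun
          have hc' : pvCond rest stack.length := by
            rcases hm with h | h | h | h <;> subst h <;>
              exact pvCond_tail_other (by decide) (by decide) (by decide) hc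
          have key := ihS rest (pvMove c pos) (pvAdd res pos (pvMove c pos)) stack l' t res'
            (by simp at hf ⊢; omega) hc' hrun'
          have hstep : stepA (pos, res, stack) c =
              (pvMove c pos, pvAdd res pos (pvMove c pos), stack) := by
            simp [stepA, hm]
          have hfoldc : List.foldl stepA (pos, res, stack) (c :: rest) =
              List.foldl stepA (pvMove c pos, pvAdd res pos (pvMove c pos), stack) rest := by
            simp [List.foldl_cons, hstep]
          refine ⟨fun h => ?_, fun h => ?_, fun h => ?_, key.2.2.2⟩
          · obtain ⟨h1, h2⟩ := key.1 h
            exact ⟨h1, by rw [hfoldc]; exact h2⟩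
          · obtain ⟨top, ts, h1, h2, h3, h4⟩ := key.2.1 h
            exact ⟨top, ts, h1, by simp; omega, h3, by rw [hfoldc]; exact h4⟩
          · obtain ⟨top, ts, h1, h2, h3, h4⟩ := key.2.2.1 h
            exact ⟨top, ts, h1, by simp; omega, h3, by rw [hfoldc]; exact h4⟩
        · by_cases hp : c = '('
          · -- open a group
            subst hp
            rcases hg : groupB f rest pos res with ⟨l1, res1⟩
            have hrun' : seqB f l1 pos res1 = (l', t, res') := by
              simpa [seqB, hm, hg] using hrun
            have hcr : pvCond rest (stack.length + 1) := pvCond_tail_open hc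
            have hfoldc : List.foldl stepA (pos, res, stack) ('(' :: rest) =
                List.foldl stepA (pos, res, pos :: stack) rest := by
              have hstep : stepA (pos, res, stack) '(' = (pos, res, pos :: stack) := by
                simp [stepA]
              simp [List.foldl_cons, hstep]
            have gres := ihG rest pos res stack l1 res1 (by simp at hf ⊢; omega) hcr hg
            rcases gres with ⟨rfl, hres⟩ | ⟨hlen, hcl1, hfoldg⟩
            · -- group ran to the end of input: l1 = []
              have hf1 : 1 ≤ f := by simp at hf; omega
              obtain ⟨f2, rfl⟩ : ∃ f2, f = f2 + 1 :=
                ⟨f - 1, by omega⟩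
              simp [seqB] at hrun'
              obtain ⟨rfl, rfl, rfl⟩ := hrun'
              refine ⟨fun _ => ⟨rfl, ?_⟩, fun h => by simp at h, fun h => by simp at h,
                      fun c h => by simp at h⟩
              rw [hfoldc]; exact hres
            · -- group closed with ')': continue at l1 with the original stack
              have key := ihS l1 pos res1 stack l' t res' (by simp at hf ⊢; omega) hcl1 hrun'
              refine ⟨fun h => ?_, fun h => ?_, fun h => ?_, key.2.2.2⟩
              · obtain ⟨h1, h2⟩ := key.1 h
                exact ⟨h1, by rw [hfoldc, hfoldg]; exact h2⟩
              · obtain ⟨top, ts, h1, h2, h3, h4⟩ := key.2.1 h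
                exact ⟨top, ts, h1, by simp at hlen ⊢; omega, h3,
                       by rw [hfoldc, hfoldg]; exact h4⟩
              · obtain ⟨top, ts, h1, h2, h3, h4⟩ := key.2.2.1 h
                exact ⟨top, ts, h1, by simp at hlen ⊢; omega, h3,
                       by rw [hfoldc, hfoldg]; exact h4⟩
          · by_cases ht : c = ')' ∨ c = '|'
            · -- terminator: return it
              have hrun' : (rest, some c, res) = (l', t, res') := by
                simpa [seqB, hm, hp, ht] using hrun
              obtain ⟨rfl, rfl, rfl⟩ := Prod.mk.injEq .. ▸ (by
                exact ⟨congrArg (·.1) hrun', congrArg (·.2.1) hrun', congrArg (·.2.2) hrun'⟩ :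
                  rest = l' ∧ some c = t ∧ res = res')
              have hpos : 0 < stack.length := pvCond_head_pos ht hc
              obtain ⟨top, ts, rfl⟩ : ∃ top ts, stack = top :: ts := by
                cases stack with
                | nil => simp at hpos
                | cons a b => exact ⟨a, b, rfl⟩
              rcases ht with rfl | rfl
              · have hstep : stepA (pos, res, top :: ts) ')' = (top, res, ts) := by
                  simp [stepA]
                refine ⟨fun h => by simp at h, fun _ => ?_, fun h => by simp at h,
                        fun c h => by cases h; exact Or.inl rfl⟩
                exact ⟨top, ts, rfl, by simp, pvCond_tail_close hc,
                       by simp [List.foldl_cons, hstep]⟩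
              · have hstep : stepA (pos, res, top :: ts) '|' = (top, res, top :: ts) := by
                  simp [stepA]
                refine ⟨fun h => by simp at h, fun h => by simp at h, fun _ => ?_,
                        fun c h => by cases h; exact Or.inr rfl⟩
                exact ⟨top, ts, rfl, by simp, pvCond_tail_bar hc,
                       by simp [List.foldl_cons, hstep]⟩
            · -- ignored character
              have hrun' : seqB f rest pos res = (l', t, res') := by
                simpa [seqB, hm, hp, ht] using hrun
              have hne : c ≠ ')' ∧ c ≠ '|' := by
                constructor <;> intro h <;> exact ht (by simp [h])
              have hc' : pvCond rest stack.length :=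
                pvCond_tail_other hp hne.1 hne.2 hc
              have key := ihS rest pos res stack l' t res' (by simp at hf ⊢; omega) hc' hrun'
              have hfoldc : List.foldl stepA (pos, res, stack) (c :: rest) =
                  List.foldl stepA (pos, res, stack) rest := by
                have hstep : stepA (pos, res, stack) c = (pos, res, stack) := by
                  simp [stepA, hm, hp, hne.1, hne.2]
                simp [List.foldl_cons, hstep]
              refine ⟨fun h => ?_, fun h => ?_, fun h => ?_, key.2.2.2⟩
              · obtain ⟨h1, h2⟩ := key.1 h
                exact ⟨h1, by rw [hfoldc]; exact h2⟩
              · obtain ⟨top, ts, h1, h2, h3, h4⟩ := key.2.1 h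
                exact ⟨top, ts, h1, by simp; omega, h3, by rw [hfoldc]; exact h4⟩
              · obtain ⟨top, ts, h1, h2, h3, h4⟩ := key.2.2.1 h
                exact ⟨top, ts, h1, by simp; omega, h3, by rw [hfoldc]; exact h4⟩
    · -- group part
      intro l start res stack0 l' res' hf hc hrun
      rcases hs : seqB f l start res with ⟨l1, t, res1⟩
      have S := ihS l start res (start :: stack0) l1 t res1 (by omega) (by simpa using hc) hs
      cases t with
      | none =>
        have hrun' : (l1, res1) = (l', res') := by
          simpa [groupB, hs] using hrun
        obtain ⟨h1, h2⟩ := S.1 rfl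
        cases hrun'
        exact Or.inl ⟨h1, h2⟩
      | some c =>
        rcases S.2.2.2 c rfl with rfl | rfl
        · -- ')' closes the group
          have hrun' : (l1, res1) = (l', res') := by
            simpa [groupB, hs] using hrun
          obtain ⟨top, ts, heq, hlen, hcond, hfold⟩ := S.2.1 rfl
          injection heq with e1 e2
          subst e1; subst e2
          cases hrun'
          exact Or.inr ⟨hlen, hcond, hfold⟩
        · -- '|' restarts a branch from the group start
          have hrun' : groupB f l1 start res1 = (l', res') := by
            simpa [groupB, hs] using hrun
          obtain ⟨top, ts, heq, hlen, hcond, hfold⟩ := S.2.2.1 rfl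
          injection heq with e1 e2
          subst e1; subst e2
          have G := ihG l1 start res1 stack0 l' res' (by omega) (by simpa using hcond) hrun'
          rcases G with ⟨rfl, hres⟩ | ⟨hlen2, hcond2, hfold2⟩
          · exact Or.inl ⟨rfl, by rw [hfold]; exact hres⟩
          · exact Or.inr ⟨by omega, hcond2, hfold.trans hfold2⟩

-- ===== VERDICT (by name: the statement is the Claim_ definition above) =====
theorem parse_spec : Claim_equal_parse := by
  unfold Claim_equal_parse
  intro x _ hpre
  unfold Spec_parse parse parse_alt
  rcases hs : seqB (2 * (pvInner x).length + 2) (pvInner x) (0, 0) PySem.Dict.empty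
    with ⟨l', t, res'⟩
  have S := (pvMain (2 * (pvInner x).length + 2)).1 (pvInner x) (0, 0) PySem.Dict.empty
    ([] : List (Int × Int)) l' t res' (by omega) (by simpa using hpre) hs
  cases t with
  | none =>
    obtain ⟨_, h2⟩ := S.1 rfl
    simp only [hs]
    rw [← h2]
  | some c =>
    rcases S.2.2.2 c rfl with rfl | rfl
    · obtain ⟨top, ts, heq, -⟩ := S.2.1 rfl
      exact absurd heq (by simp)
    · obtain ⟨top, ts, heq, -⟩ := S.2.2.1 rfl
      exact absurd heq (by simp)
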